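-- pv_equiv track=rewrite | github.com/curiousdata/catalonia-wildfire-prediction | catalonia-wildfire-mvp/backend/src/inference/predict.py | _resolve_clc_var
-- ===== SOURCE A (Python) =====
-- from typing import Any, Callable, Dict, Iterable, List, Literal, Optional, Tuple
--
-- def _resolve_clc_var(ds: Any, base: str, year: int) -> str:
--     """Resolve base CLC feature (e.g., 'CLC_1' or 'CLC_forest_proportion') to a year-specific variable name."""
--     suffix = base[len("CLC_") :]
--     candidates = {
--         2006: f"CLC_2006_{suffix}",
--         2012: f"CLC_2012_{suffix}",
--         2018: f"CLC_2018_{suffix}",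
--     }
--
--     if year <= 2011:
--         preferred_year = 2006
--     elif year <= 2017:
--         preferred_year = 2012
--     else:
--         preferred_year = 2018
--
--     preferred = candidates[preferred_year]
--     if preferred in ds:
--         return preferred
--
--     available_years = [yy for yy, name in candidates.items() if name in ds]
--     if not available_years:
--         raise KeyError(
--             f"CLC base feature '{base}' could not be resolved. Tried: {list(candidates.values())}"
--         )
--
--     nearest = min(available_years, key=lambda yy: abs(yy - year))
--     return candidates[nearest]
-- ===== SOURCE B (Python) =====
-- def _resolve_clc_var(ds, base: str, year: int) -> str:
--     """Resolve base CLC feature to a year-specific name: the full preference order of the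
--     three CLC years is a closed-form function of year alone, so pick the permutation by
--     threshold and return the first name present in ds."""
--     suffix = base[len("CLC_"):]
--     if year <= 2011:
--         order = (2006, 2012, 2018)
--     elif year <= 2012:
--         order = (2012, 2006, 2018)
--     elif year <= 2017:
--         order = (2012, 2018, 2006)
--     else:
--         order = (2018, 2012, 2006)
--     for yy in order:
--         name = f"CLC_{yy}_{suffix}"
--         if name in ds:
--             return name
--     raise KeyError(
--         f"CLC base feature '{base}' could not be resolved. Tried: {[f'CLC_{yy}_{suffix}' for yy in (2006, 2012, 2018)]}"
--     )
-- ===== Notes on version B (the rewrite author's own statement) =====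
-- stated objective: alternative
-- what changed: Replaces A's candidates dict, preferred-branch, membership list-comprehension and min-by-distance scan with a closed-form preference table: the full permutation of (2006,2012,2018) is determined by year thresholds alone, and B returns the first name of that permutation present in ds.
-- outside the precondition, e.g. on _resolve_clc_var(set(), 'CLC_x', 2010): A raises KeyError, B raises KeyError
import Mathlib
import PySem

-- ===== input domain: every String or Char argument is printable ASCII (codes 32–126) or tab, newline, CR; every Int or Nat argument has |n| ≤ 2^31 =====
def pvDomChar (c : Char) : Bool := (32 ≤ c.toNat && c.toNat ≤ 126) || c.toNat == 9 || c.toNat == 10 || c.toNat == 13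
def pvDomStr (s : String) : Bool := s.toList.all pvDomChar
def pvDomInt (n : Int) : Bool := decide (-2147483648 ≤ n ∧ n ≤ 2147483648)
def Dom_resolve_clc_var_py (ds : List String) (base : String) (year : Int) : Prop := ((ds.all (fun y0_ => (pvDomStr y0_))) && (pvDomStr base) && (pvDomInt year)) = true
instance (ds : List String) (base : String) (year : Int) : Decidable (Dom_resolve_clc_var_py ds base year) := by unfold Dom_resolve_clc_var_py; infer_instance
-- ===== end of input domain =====

-- B replaces A's dict + preferred-branch + min-by-distance fallback with a closed-form
-- preference table keyed on year thresholds, scanned once; objective: alternative.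
-- Equivalence is about the RETURN value; where A raises KeyError (no candidate in ds,
-- excluded by Pre_) B raises the identical KeyError.

-- ===== PORT A =====
def resolve_clc_var_py (ds : List String) (base : String) (year : Int) : String :=
  let suffix := PySem.Str.slice base (some 4) none
  let candidates : PySem.Dict Int String :=
    ((PySem.Dict.empty.insert 2006 ("CLC_2006_" ++ suffix)).insert 2012
        ("CLC_2012_" ++ suffix)).insert 2018 ("CLC_2018_" ++ suffix)
  let preferred_year : Int := if year ≤ 2011 then 2006 else if year ≤ 2017 then 2012 else 2018
  let preferred := candidates.getD preferred_year ""
  if preferred ∈ ds then preferred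
  else
    let available_years := (candidates.items.filter (fun p => decide (p.2 ∈ ds))).map (·.1)
    if available_years = [] then ""   -- Python raises KeyError here (excluded by Pre_)
    else
      match PySem.List.min? available_years (fun yy => |yy - year|) with
      | some nearest => candidates.getD nearest ""
      | none => ""                    -- unreachable: available_years ≠ []

-- ===== PORT B =====
def resolve_clc_var_py_alt (ds : List String) (base : String) (year : Int) : String :=
  let suffix := PySem.Str.slice base (some 4) none
  let order : List Int :=
    if year ≤ 2011 then [2006, 2012, 2018]
    else if year ≤ 2012 then [2012, 2006, 2018]
    else if year ≤ 2017 then [2012, 2018, 2006]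
    else [2018, 2012, 2006]
  match order.find? (fun yy => decide (("CLC_" ++ PySem.Int.toStr yy ++ "_" ++ suffix) ∈ ds)) with
  | some yy => "CLC_" ++ PySem.Int.toStr yy ++ "_" ++ suffix
  | none => ""                        -- Python raises KeyError here (excluded by Pre_)

-- ===== PRECONDITION & SPEC =====
-- Pre_ excludes exactly the inputs where none of the three year-specific candidate names is in
-- ds: there A raises KeyError (and B raises the identical KeyError).
def Pre_resolve_clc_var_py (ds : List String) (base : String) (year : Int) : Prop :=
  ("CLC_2006_" ++ PySem.Str.slice base (some 4) none) ∈ ds ∨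
  ("CLC_2012_" ++ PySem.Str.slice base (some 4) none) ∈ ds ∨
  ("CLC_2018_" ++ PySem.Str.slice base (some 4) none) ∈ ds
instance (ds : List String) (base : String) (year : Int) : Decidable (Pre_resolve_clc_var_py ds base year) := by unfold Pre_resolve_clc_var_py; infer_instance

def pvWitness_resolve_clc_var_py : List String × String × Int :=
  (["CLC_2006_forest", "CLC_2012_forest"], "CLC_forest", 2014)

def Spec_resolve_clc_var_py (ds : List String) (base : String) (year : Int) (out : String) : Prop := out = resolve_clc_var_py_alt ds base year
instance (ds : List String) (base : String) (year : Int) (out : String) : Decidable (Spec_resolve_clc_var_py ds base year out) := by unfold Spec_resolve_clc_var_py; infer_instance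

-- ===== CLAIM (what is proved, stated in full; the proofs are below) =====
def Claim_equal_resolve_clc_var_py : Prop := ∀ (ds : List String) (base : String) (year : Int), Dom_resolve_clc_var_py ds base year → Pre_resolve_clc_var_py ds base year → Spec_resolve_clc_var_py ds base year (resolve_clc_var_py ds base year)

-- ===== LEMMAS AND PROOFS =====

-- ===== VERDICT (by name: the statement is the Claim_ definition above) =====
set_option maxHeartbeats 4000000 in
theorem resolve_clc_var_py_spec : Claim_equal_resolve_clc_var_py := by
  intro ds base year _ hpre
  unfold Spec_resolve_clc_var_py resolve_clc_var_py resolve_clc_var_py_alt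
  dsimp only
  unfold Pre_resolve_clc_var_py at hpre
  have e6 : ∀ s : String, "CLC_" ++ PySem.Int.toStr 2006 ++ "_" ++ s = "CLC_2006_" ++ s :=
    fun s => rfl
  have e2 : ∀ s : String, "CLC_" ++ PySem.Int.toStr 2012 ++ "_" ++ s = "CLC_2012_" ++ s :=
    fun s => rfl
  have e8 : ∀ s : String, "CLC_" ++ PySem.Int.toStr 2018 ++ "_" ++ s = "CLC_2018_" ++ s :=
    fun s => rfl
  have hd : ∀ a b c : String, ((PySem.Dict.empty.insert (2006:Int) a).insert 2012 b).insert 2018 c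
      = PySem.Dict.mk [(2006, a), (2012, b), (2018, c)] := fun _ _ _ => rfl
  rw [hd]
  rcases (by omega : (year ≤ 2011 ∧ year ≤ 2012 ∧ year ≤ 2017) ∨
      (¬ year ≤ 2011 ∧ year ≤ 2012 ∧ year ≤ 2017) ∨
      (¬ year ≤ 2011 ∧ ¬ year ≤ 2012 ∧ year ≤ 2017) ∨
      (¬ year ≤ 2011 ∧ ¬ year ≤ 2012 ∧ ¬ year ≤ 2017)) with
    ⟨hy, hy', hy''⟩ | ⟨hy, hy', hy''⟩ | ⟨hy, hy', hy''⟩ | ⟨hy, hy', hy''⟩ <;>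
  by_cases m06 : ("CLC_2006_" ++ PySem.Str.slice base (some 4) none) ∈ ds <;>
  by_cases m12 : ("CLC_2012_" ++ PySem.Str.slice base (some 4) none) ∈ ds <;>
  by_cases m18 : ("CLC_2018_" ++ PySem.Str.slice base (some 4) none) ∈ ds <;>
    simp only [hy, hy', hy'', if_true, if_false, List.find?] <;>
    (try simp only [e6, e2, e8]) <;>
    simp [m06, m12, m18, PySem.Dict.getD, PySem.Dict.get?_mk_cons,
      PySem.List.min?, List.filter, List.find?] <;>
    (try split_ifs) <;>
    first
      | rfl
      | (exfalso; simp only [Int.abs_eq_natAbs] at *; omega)
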